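-- pv_equiv track=rewrite | github.com/k3rbot/Choixpeau | site.py | best_house
-- ===== SOURCE A (Python) =====
-- def best_house(neighbours: list) -> str:
--     """
--     Renvoie la maison apparaissant le plus dans la liste des plus proches voisins
--
--     Entrée: Liste des plus proches voisins
--     Sortie: La maison apparaissant le plus parmi la liste des voisins
--     """
--
--     houses = {}
--     for neighbour in neighbours:
--         if neighbour['House'] in houses:
--             houses[neighbour['House']] += 1
--         else:
--             houses[neighbour['House']] = 1
--     max = 0
--     for house, n in houses.items():
--         if n > max:
--             max = n
--             best_house = house
--     return best_house
-- ===== SOURCE B (Python) =====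
-- def best_house(neighbours: list) -> str:
--     # Recursive partition: strip all occurrences of the first house, count it by the
--     # length drop, recurse on the remainder; '>=' keeps the earlier house on ties,
--     # matching A's first-appearance tie-break.
--     def go(hs):
--         h = hs[0]
--         rest = [x for x in hs if x != h]
--         c = len(hs) - len(rest)
--         if not rest:
--             return h, c
--         bh, bc = go(rest)
--         if c >= bc:
--             return h, c
--         return bh, bc
--     return go([n['House'] for n in neighbours])[0]
-- ===== Notes on version B (the rewrite author's own statement) =====
-- stated objective: alternative
-- what changed: replaces A's count-dict built key-by-key plus a max-scan over items() with a recursive partition: strip all occurrences of the first house, obtain its count as the length drop, recurse on the remainder and prefer the earlier house on ties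
import Mathlib
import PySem

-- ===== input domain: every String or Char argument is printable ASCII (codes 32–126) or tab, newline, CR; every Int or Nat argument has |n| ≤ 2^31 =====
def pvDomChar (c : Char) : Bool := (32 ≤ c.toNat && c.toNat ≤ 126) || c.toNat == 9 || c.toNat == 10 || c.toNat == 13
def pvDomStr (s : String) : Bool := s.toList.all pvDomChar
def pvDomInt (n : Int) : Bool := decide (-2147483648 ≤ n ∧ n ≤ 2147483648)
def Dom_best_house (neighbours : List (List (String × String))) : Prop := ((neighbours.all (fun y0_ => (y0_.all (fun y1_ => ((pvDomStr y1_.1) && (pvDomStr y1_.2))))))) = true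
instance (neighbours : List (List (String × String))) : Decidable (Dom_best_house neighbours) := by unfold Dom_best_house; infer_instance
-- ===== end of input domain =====

-- B replaces A's count-dict + max-scan with a recursive partition (strip the first house's
-- occurrences, count it by the length drop, recurse on the rest); same return value on Pre_.

-- ===== PORT A =====
-- neighbour['House'] : first-match lookup in the association list (Python dict access)
def best_house (neighbours : List (List (String × String))) : String :=
  let houses : PySem.Dict String Int := neighbours.foldl (fun d n =>
    let h := (PySem.Dict.mk n).getD "House" ""
    if d.contains h then d.insert h (d.getD h 0 + 1) else d.insert h 1) PySem.Dict.empty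
  (houses.items.foldl (fun (acc : Int × String) p =>
    if p.2 > acc.1 then (p.2, p.1) else acc) (0, "")).2

-- ===== PORT B =====
-- go(hs): h = hs[0]; rest = [x for x in hs if x != h]; c = len(hs) - len(rest);
--         base when rest is empty, else recurse and keep (h, c) iff c >= bc.
def goB : List String → String × Int
  | [] => ("", 0)   -- unreachable (go is only called on non-empty lists); totality default
  | h :: t =>
    let rest := (h :: t).filter (fun x => !(x == h))
    let c : Int := ((h :: t).length : Int) - (rest.length : Int)
    if rest.isEmpty then (h, c)
    else
      let b := goB rest
      if c ≥ b.2 then (h, c) else b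
termination_by l => l.length
decreasing_by
  simp only [List.filter_cons, beq_self_eq_true, Bool.not_true, Bool.false_eq_true, if_false,
    List.length_cons]
  have := List.length_filter_le (fun x => !(x == h)) t
  omega

def best_house_alt (neighbours : List (List (String × String))) : String :=
  (goB (neighbours.map (fun n => (PySem.Dict.mk n).getD "House" ""))).1

-- ===== PRECONDITION & SPEC =====
-- Pre_ excludes exactly the inputs where the Python A raises: the empty list (UnboundLocalError:
-- best_house never assigned) and neighbours lacking a 'House' key (KeyError).
def Pre_best_house (neighbours : List (List (String × String))) : Prop :=
  neighbours ≠ [] ∧ ∀ n ∈ neighbours, (PySem.Dict.mk n).contains "House" = true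
instance (neighbours : List (List (String × String))) : Decidable (Pre_best_house neighbours) := by
  unfold Pre_best_house; infer_instance
def pvWitness_best_house : (List (List (String × String))) :=
  [[("House", "Gryffindor")], [("House", "Slytherin")], [("House", "Gryffindor")]]
def Spec_best_house (neighbours : List (List (String × String))) (out : String) : Prop := out = best_house_alt neighbours
instance (neighbours : List (List (String × String))) (out : String) : Decidable (Spec_best_house neighbours out) := by unfold Spec_best_house; infer_instance

-- ===== CLAIM (what is proved, stated in full; the proofs are below) =====
def Claim_equal_best_house : Prop := ∀ (neighbours : List (List (String × String))), Dom_best_house neighbours → Pre_best_house neighbours → Spec_best_house neighbours (best_house neighbours)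

-- ===== LEMMAS AND PROOFS =====
-- goB on a cons, with the filter over the head already discharged
theorem goB_cons (h : String) (t : List String) :
    goB (h :: t) =
      (let rest := t.filter (fun x => !(x == h));
       let c : Int := ((h :: t).length : Int) - (rest.length : Int);
       if rest.isEmpty then (h, c) else (let b := goB rest; if c ≥ b.2 then (h, c) else b)) := by
  rw [goB]; simp

-- A's branchy count loop is the uniform insert-getD+1 loop, hence PySem.Dict.counter of the house list.
theorem best_house_counter (neighbours : List (List (String × String))) :
    neighbours.foldl (fun d n =>
      let h := (PySem.Dict.mk n).getD "House" ""
      if d.contains h then d.insert h (d.getD h 0 + 1) else d.insert h 1) PySem.Dict.empty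
    = PySem.Dict.counter (neighbours.map (fun n => (PySem.Dict.mk n).getD "House" "")) := by
  rw [← PySem.Dict.foldl_insert_getD_add_one_eq_counter, List.foldl_map]
  apply PySem.List.foldl_congr_mem
  intro d n _
  by_cases hc : d.contains ((PySem.Dict.mk n).getD "House" "") = true
  · simp [hc]
  · have hc' : d.contains ((PySem.Dict.mk n).getD "House" "") = false := by simpa using hc
    simp [hc', PySem.Dict.getD_of_not_contains (d := d) (h := hc') (d0 := 0)]

-- ordered dedup commutes with filter
theorem ofList_filter {α : Type} [BEq α] [LawfulBEq α] (p : α → Bool) (l : List α) :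
    PySem.Set.ofList (l.filter p) = (PySem.Set.ofList l).filter p := by
  induction l with
  | nil => rfl
  | cons a l ih =>
    by_cases hp : p a = true
    · simp only [List.filter_cons, hp, if_true, PySem.Set.ofList_cons, PySem.Set.discard, ih,
        List.filter_filter]
      congr 1
      apply List.filter_congr
      intro x _
      by_cases hx : x = a <;> simp [hx, hp, Bool.and_comm]
    · have hp' : p a = false := by simpa using hp
      simp only [List.filter_cons, hp', PySem.Set.ofList_cons, PySem.Set.discard, ih,
        List.filter_filter, Bool.false_eq_true, if_false]
      apply List.filter_congr
      intro x _
      by_cases hx : x = a <;> simp [hx, hp']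

theorem length_filter_ne_add_count (t : List String) (h : String) :
    (t.filter (fun x => !(x == h))).length + t.count h = t.length := by
  induction t with
  | nil => rfl
  | cons a t ih =>
    by_cases ha : a = h
    · subst ha; simp; omega
    · simp [ha]; omega

theorem goB_pos_aux : ∀ (n : Nat) (hs : List String), hs.length ≤ n → hs ≠ [] → 1 ≤ (goB hs).2 := by
  intro n
  induction n with
  | zero =>
    intro hs hlen hne
    cases hs with
    | nil => exact absurd rfl hne
    | cons h t => simp at hlen
  | succ n ih =>
    intro hs hlen hne
    cases hs with
    | nil => exact absurd rfl hne
    | cons h t =>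
      rw [goB_cons]
      have hlf := List.length_filter_le (fun x => !(x == h)) t
      by_cases hr : (t.filter (fun x => !(x == h))).isEmpty = true
      · simp only [hr, if_true, List.length_cons]
        push_cast
        omega
      · have hrest : t.filter (fun x => !(x == h)) ≠ [] := by
          simpa [List.isEmpty_iff] using hr
        have hb := ih _ (by simp at hlen ⊢; omega) hrest
        simp only [hr, Bool.false_eq_true, if_false, List.length_cons]
        split
        · push_cast; omega
        · exact hb

theorem goB_pos (hs : List String) (hne : hs ≠ []) : 1 ≤ (goB hs).2 :=
  goB_pos_aux hs.length hs le_rfl hne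

-- the A-side fold step, with counts taken in hs
def stepF (hs : List String) (acc : Int × String) (k : String) : Int × String :=
  if ((hs.count k : Int)) > acc.1 then ((hs.count k : Int), k) else acc

theorem mainL_aux : ∀ (n : Nat) (hs : List String), hs.length ≤ n → hs ≠ [] →
    ∀ (a : Int × String),
    List.foldl (stepF hs) a (PySem.Set.ofList hs)
      = if (goB hs).2 > a.1 then ((goB hs).2, (goB hs).1) else a := by
  intro n
  induction n with
  | zero =>
    intro hs hlen hne
    cases hs with
    | nil => exact absurd rfl hne
    | cons h t => simp at hlen
  | succ n ih =>
    intro hs hlen hne a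
    cases hs with
    | nil => exact absurd rfl hne
    | cons h t =>
      have hlf := List.length_filter_le (fun x => !(x == h)) t
      have hcnt := length_filter_ne_add_count t h
      have hcount : ((h :: t).count h : Int)
          = ((h :: t).length : Int) - ((t.filter (fun x => !(x == h))).length : Int) := by
        simp
        omega
      have hofl : PySem.Set.ofList (h :: t)
          = h :: PySem.Set.ofList (t.filter (fun x => !(x == h))) := by
        rw [PySem.Set.ofList_cons, ofList_filter]; rfl
      rw [goB_cons, hofl]
      by_cases hr : (t.filter (fun x => !(x == h))).isEmpty = true
      · -- all of t equals h: the dedup is [h]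
        have hrt : t.filter (fun x => !(x == h)) = [] := List.isEmpty_iff.mp hr
        rw [hrt]
        have hct : t.count h = t.length := by rw [hrt] at hcnt; simpa using hcnt
        simp [stepF, hct]
      · have hrest : t.filter (fun x => !(x == h)) ≠ [] := by
          simpa [List.isEmpty_iff] using hr
        have hcongr : ∀ (a' : Int × String),
            List.foldl (stepF (h :: t)) a' (PySem.Set.ofList (t.filter (fun x => !(x == h))))
            = List.foldl (stepF (t.filter (fun x => !(x == h)))) a'
                (PySem.Set.ofList (t.filter (fun x => !(x == h)))) := by
          intro a'
          apply PySem.List.foldl_congr_mem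
          intro acc k hk
          have hk' : k ∈ t.filter (fun x => !(x == h)) := by simpa [PySem.Set.mem_ofList] using hk
          have hkh : (k == h) = false := by simpa using (List.mem_filter.mp hk').2
          have hne' : ¬ h = k := fun he => by subst he; simp at hkh
          have hsame : (h :: t).count k = (t.filter (fun x => !(x == h))).count k := by
            rw [List.count_filter (by simpa using hkh)]
            simp [hne']
          simp [stepF, hsame]
        have hih := ih (t.filter (fun x => !(x == h)))
          (by simp at hlen ⊢; omega) hrest (stepF (h :: t) a h)
        rw [List.foldl_cons, hcongr, hih]
        have hbpos := goB_pos _ hrest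
        have hstep1 : stepF (h :: t) a h
            = if (((h :: t).length : Int) - ((t.filter (fun x => !(x == h))).length : Int)) > a.1
              then ((((h :: t).length : Int) - ((t.filter (fun x => !(x == h))).length : Int)), h)
              else a := by
          unfold stepF; rw [hcount]
        rw [hstep1]
        simp only [hr, Bool.false_eq_true, if_false]
        rcases hgb : goB (t.filter (fun x => !(x == h))) with ⟨bh, bc⟩
        rw [hgb] at hbpos
        simp only at hbpos ⊢
        split_ifs <;> simp_all <;> omega

-- ===== VERDICT (by name: the statement is the Claim_ definition above) =====
theorem best_house_spec : Claim_equal_best_house := by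
  intro neighbours _ hpre
  obtain ⟨hne, -⟩ := hpre
  have hhs : neighbours.map (fun n => (PySem.Dict.mk n).getD "House" "") ≠ [] := by
    simpa using hne
  unfold Spec_best_house best_house best_house_alt
  rw [best_house_counter]
  simp only [PySem.Dict.items_counter, List.foldl_map]
  have hmain := mainL_aux (neighbours.map (fun n => (PySem.Dict.mk n).getD "House" "")).length
    _ le_rfl hhs (0, "")
  have hpos := goB_pos _ hhs
  unfold stepF at hmain
  rw [hmain]
  rw [if_pos (by omega)]
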